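-- pv_equiv track=rewrite | github.com/JustinTime42/stanley | src/testing/healing/repair_strategies/import_repair.py | _add_comment
-- ===== SOURCE A (Python) =====
-- def _add_comment(code: str, root_cause: str) -> str:
--     """Add comment when automatic repair not possible.
--
--     Args:
--         code: Original code
--         root_cause: Root cause description
--
--     Returns:
--         Code with comment added
--     """
--     lines = code.split("\n")
--     repaired_lines = []
--
--     # Find first import and add comment there
--     first_import_found = False
--
--     for line in lines:
--         if not first_import_found and ("import" in line or "from" in line):
--             indent = len(line) - len(line.lstrip())
--             indent_str = " " * indent
--             repaired_lines.append(
--                 f"{indent_str}# FIXME: Import error detected - {root_cause}"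
--             )
--             first_import_found = True
--
--         repaired_lines.append(line)
--
--     return "\n".join(repaired_lines)
-- ===== SOURCE B (Python) =====
-- def _add_comment(code: str, root_cause: str) -> str:
--     """Find-then-splice: locate the first import-like line, insert the FIXME comment there."""
--     lines = code.split("\n")
--     hit = next(((i, l) for i, l in enumerate(lines) if "import" in l or "from" in l), None)
--     if hit is None:
--         return "\n".join(lines)
--     i, line = hit
--     indent_str = " " * (len(line) - len(line.lstrip()))
--     lines.insert(i, f"{indent_str}# FIXME: Import error detected - {root_cause}")
--     return "\n".join(lines)
-- ===== Notes on version B (the rewrite author's own statement) =====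
-- stated objective: simpler
-- what changed: Replaces the flag-driven build-while-scan loop with a separate find (first import-like line via next/enumerate) then a single list.insert splice at that index.
import Mathlib
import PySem

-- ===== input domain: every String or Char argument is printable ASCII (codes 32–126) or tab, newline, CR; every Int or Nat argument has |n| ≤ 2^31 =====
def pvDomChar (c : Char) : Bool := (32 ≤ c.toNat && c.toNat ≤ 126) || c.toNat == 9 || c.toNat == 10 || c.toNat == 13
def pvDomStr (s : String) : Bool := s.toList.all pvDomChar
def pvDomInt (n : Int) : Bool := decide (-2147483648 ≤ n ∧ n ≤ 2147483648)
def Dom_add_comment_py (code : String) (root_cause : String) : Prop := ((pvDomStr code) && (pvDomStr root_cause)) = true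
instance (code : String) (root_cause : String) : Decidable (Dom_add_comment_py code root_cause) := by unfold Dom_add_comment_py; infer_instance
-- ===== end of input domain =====

-- B replaces A's flag-driven build-while-scan with a find-then-splice (locate first import-like line, then one insert); objective: simpler.

-- shared by both ports (both Pythons use the identical test and f-string)
def pvImportPred (line : String) : Bool :=
  PySem.Str.isIn "import" line || PySem.Str.isIn "from" line

def pvFixme (line : String) (root_cause : String) : String :=
  String.ofList (List.replicate (PySem.Str.len line - PySem.Str.len (PySem.Str.lstrip line)).toNat ' ') ++
    "# FIXME: Import error detected - " ++ root_cause

-- ===== PORT A =====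
-- A's for-loop over lines with the first_import_found flag and the growing repaired_lines
def addCommentLoopA (root_cause : String) : List String → Bool → List String
  | [], _ => []
  | l :: ls, found =>
    if !found && pvImportPred l then
      pvFixme l root_cause :: l :: addCommentLoopA root_cause ls true
    else
      l :: addCommentLoopA root_cause ls found

def add_comment_py (code : String) (root_cause : String) : String :=
  PySem.Str.join "\n" (addCommentLoopA root_cause ((PySem.Str.split? code "\n").getD []) false)

-- ===== PORT B =====
def add_comment_py_alt (code : String) (root_cause : String) : String :=
  let lines := (PySem.Str.split? code "\n").getD []
  match (PySem.List.enumerate lines 0).find? (fun p => pvImportPred p.2) with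
  | none => PySem.Str.join "\n" lines
  | some (i, l) => PySem.Str.join "\n" (PySem.List.insert lines i (pvFixme l root_cause))

-- ===== PRECONDITION & SPEC =====
def Spec_add_comment_py (code : String) (root_cause : String) (out : String) : Prop := out = add_comment_py_alt code root_cause
instance (code : String) (root_cause : String) (out : String) : Decidable (Spec_add_comment_py code root_cause out) := by unfold Spec_add_comment_py; infer_instance

-- ===== CLAIM (what is proved, stated in full; the proofs are below) =====
def Claim_equal_add_comment_py : Prop := ∀ (code : String) (root_cause : String), Dom_add_comment_py code root_cause → Spec_add_comment_py code root_cause (add_comment_py code root_cause)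

-- ===== LEMMAS AND PROOFS =====

lemma loopA_true (rc : String) (ls : List String) : addCommentLoopA rc ls true = ls := by
  induction ls with
  | nil => rfl
  | cons l ls ih => simp [addCommentLoopA, ih]

lemma loopA_key (rc : String) (s : Int) (ls : List String) :
    addCommentLoopA rc ls false =
      (match (PySem.List.enumerate ls s).find? (fun p => pvImportPred p.2) with
       | none => ls
       | some (i, l) => PySem.List.insert ls (i - s) (pvFixme l rc)) := by
  induction ls generalizing s with
  | nil => simp [addCommentLoopA, PySem.List.enumerate_nil]
  | cons l ls ih =>
    rw [PySem.List.enumerate_cons]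
    by_cases hp : pvImportPred l = true
    · simp [addCommentLoopA, List.find?, hp, loopA_true, PySem.List.insert_zero]
    · simp only [addCommentLoopA, List.find?, hp, Bool.not_false, Bool.true_and]
      rw [ih (s + 1)]
      cases hf : (PySem.List.enumerate ls (s + 1)).find? (fun p => pvImportPred p.2) with
      | none => simp
      | some p =>
        obtain ⟨i, l'⟩ := p
        have hmem : (i, l') ∈ PySem.List.enumerate ls (s + 1) := List.mem_of_find?_eq_some hf
        rw [PySem.List.mem_enumerate_iff] at hmem
        obtain ⟨k, hk, hkeq⟩ := hmem
        have hi : i = s + 1 + k := by simpa using congrArg Prod.fst hkeq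
        have h1 : i - s = ((k + 1 : Nat) : Int) := by omega
        have h2 : i - (s + 1) = ((k : Nat) : Int) := by omega
        simp only [h1, h2]
        rw [PySem.List.insert_natCast (l :: ls) (k + 1) (pvFixme l' rc)
              (by simpa using Nat.succ_le_succ (Nat.le_of_lt hk))]
        simp only [List.take_succ_cons, List.drop_succ_cons]
        rw [PySem.List.insert_natCast ls k (pvFixme l' rc) (Nat.le_of_lt hk)]
        simp only [Bool.false_eq_true, if_false, List.cons_append]

-- ===== VERDICT (by name: the statement is the Claim_ definition above) =====
theorem add_comment_py_spec : Claim_equal_add_comment_py := by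
  intro code rc _
  unfold Spec_add_comment_py add_comment_py add_comment_py_alt
  rw [loopA_key rc 0]
  cases hf : (PySem.List.enumerate ((PySem.Str.split? code "\n").getD []) 0).find? (fun p => pvImportPred p.2) with
  | none => simp [hf]
  | some p => obtain ⟨i, l⟩ := p; simp [hf]
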